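-- pv_equiv track=rewrite | github.com/Halildeu/autonomous-orchestrator | src/ops/commands/llm_live_cmds.py | _provider_allowed_by_policy
-- ===== SOURCE A (Python) =====
-- from typing import Any, Dict, Iterable, List, Tuple
--
-- def _provider_allowed_by_policy(provider_id: str, allowlist: List[str]) -> bool:
--     pid = str(provider_id or "").strip().lower()
--     allow = [str(x).strip().lower() for x in (allowlist or []) if isinstance(x, str)]
--     if pid in allow:
--         return True
--     if pid == "gemini" and "google" in allow:
--         return True
--     if pid == "google" and "gemini" in allow:
--         return True
--     if pid == "grok" and "xai" in allow:
--         return True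
--     if pid == "xai" and "grok" in allow:
--         return True
--     return False
-- ===== SOURCE B (Python) =====
-- from typing import List
--
-- _ALIAS_GROUPS = [{"gemini", "google"}, {"grok", "xai"}]
--
-- def _provider_allowed_by_policy(provider_id: str, allowlist: List[str]) -> bool:
--     pid = str(provider_id or "").strip().lower()
--     acceptable = {pid}
--     for group in _ALIAS_GROUPS:
--         if pid in group:
--             acceptable |= group
--     return any(
--         str(x).strip().lower() in acceptable
--         for x in (allowlist or [])
--         if isinstance(x, str)
--     )
-- ===== Notes on version B (the rewrite author's own statement) =====
-- stated objective: simpler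
-- what changed: Replaces the normalize-whole-list-then-four-special-case-branches chain with a constant alias-group table: the set of acceptable names is built once (pid plus any alias group containing it) and the allowlist is scanned a single time with one membership test per entry.
import Mathlib
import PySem

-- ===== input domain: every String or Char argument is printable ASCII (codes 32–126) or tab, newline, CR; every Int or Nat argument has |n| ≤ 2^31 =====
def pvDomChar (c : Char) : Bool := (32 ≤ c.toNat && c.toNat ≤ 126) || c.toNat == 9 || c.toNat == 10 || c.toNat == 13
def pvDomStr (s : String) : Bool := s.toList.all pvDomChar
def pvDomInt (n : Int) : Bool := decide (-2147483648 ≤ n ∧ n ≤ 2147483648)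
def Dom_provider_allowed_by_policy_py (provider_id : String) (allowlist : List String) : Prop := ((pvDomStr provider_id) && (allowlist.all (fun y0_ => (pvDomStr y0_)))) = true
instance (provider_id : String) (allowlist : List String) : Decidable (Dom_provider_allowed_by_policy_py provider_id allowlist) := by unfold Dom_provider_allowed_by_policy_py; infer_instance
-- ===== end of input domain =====

-- B replaces A's normalize-then-four-special-case-branch chain by a constant alias-group
-- table: build the set of acceptable names once, then scan the allowlist a single time
-- (objective: simpler decomposition; same cost).

-- normalization applied by both Pythons: str(x).strip().lower()
def pvNorm (s : String) : String := PySem.Str.lower (PySem.Str.strip s)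

-- ===== PORT A =====
def provider_allowed_by_policy_py (provider_id : String) (allowlist : List String) : Bool :=
  let pid := pvNorm provider_id
  let allow := allowlist.map pvNorm
  if allow.contains pid then true
  else if pid == "gemini" && allow.contains "google" then true
  else if pid == "google" && allow.contains "gemini" then true
  else if pid == "grok" && allow.contains "xai" then true
  else if pid == "xai" && allow.contains "grok" then true
  else false

-- ===== PORT B =====
def pvAliasGroups : List (PySem.Set String) :=
  [PySem.Set.ofList ["gemini", "google"], PySem.Set.ofList ["grok", "xai"]]

def pvAcceptable (pid : String) : PySem.Set String :=
  pvAliasGroups.foldl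
    (fun acc g => if PySem.Set.contains g pid then PySem.Set.union acc g else acc)
    (PySem.Set.ofList [pid])

def provider_allowed_by_policy_py_alt (provider_id : String) (allowlist : List String) : Bool :=
  let pid := pvNorm provider_id
  let acceptable := pvAcceptable pid
  allowlist.any (fun x => PySem.Set.contains acceptable (pvNorm x))

-- ===== PRECONDITION & SPEC =====
def Spec_provider_allowed_by_policy_py (provider_id : String) (allowlist : List String) (out : Bool) : Prop := out = provider_allowed_by_policy_py_alt provider_id allowlist
instance (provider_id : String) (allowlist : List String) (out : Bool) : Decidable (Spec_provider_allowed_by_policy_py provider_id allowlist out) := by unfold Spec_provider_allowed_by_policy_py; infer_instance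

-- ===== CLAIM (what is proved, stated in full; the proofs are below) =====
def Claim_equal_provider_allowed_by_policy_py : Prop := ∀ (provider_id : String) (allowlist : List String), Dom_provider_allowed_by_policy_py provider_id allowlist → Spec_provider_allowed_by_policy_py provider_id allowlist (provider_allowed_by_policy_py provider_id allowlist)

-- ===== LEMMAS AND PROOFS =====

theorem pvAcceptable_gemini : pvAcceptable "gemini" = ["gemini", "google"] := by decide
theorem pvAcceptable_google : pvAcceptable "google" = ["google", "gemini"] := by decide
theorem pvAcceptable_grok : pvAcceptable "grok" = ["grok", "xai"] := by decide
theorem pvAcceptable_xai : pvAcceptable "xai" = ["xai", "grok"] := by decide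

theorem pvAcceptable_other (pid : String) (h1 : pid ≠ "gemini") (h2 : pid ≠ "google")
    (h3 : pid ≠ "grok") (h4 : pid ≠ "xai") : pvAcceptable pid = [pid] := by
  simp [pvAcceptable, pvAliasGroups, PySem.Set.contains, PySem.Set.ofList, h1, h2, h3, h4]

-- A's branch chain equals B's single scan, for every pid and normalized list.
theorem pv_main (pid : String) (allow : List String) :
    (if allow.contains pid then true
     else if pid == "gemini" && allow.contains "google" then true
     else if pid == "google" && allow.contains "gemini" then true
     else if pid == "grok" && allow.contains "xai" then true
     else if pid == "xai" && allow.contains "grok" then true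
     else false)
    = allow.any (fun a => PySem.Set.contains (pvAcceptable pid) a) := by
  by_cases h1 : pid = "gemini"
  · subst h1
    rw [pvAcceptable_gemini, Bool.eq_iff_iff]
    simp [PySem.Set.contains, List.any_eq_true]
    aesop
  by_cases h2 : pid = "google"
  · subst h2
    rw [pvAcceptable_google, Bool.eq_iff_iff]
    simp [PySem.Set.contains, List.any_eq_true]
    aesop
  by_cases h3 : pid = "grok"
  · subst h3
    rw [pvAcceptable_grok, Bool.eq_iff_iff]
    simp [PySem.Set.contains, List.any_eq_true]
    aesop
  by_cases h4 : pid = "xai"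
  · subst h4
    rw [pvAcceptable_xai, Bool.eq_iff_iff]
    simp [PySem.Set.contains, List.any_eq_true]
    aesop
  · rw [pvAcceptable_other pid h1 h2 h3 h4, Bool.eq_iff_iff]
    simp [PySem.Set.contains, List.any_eq_true, h1, h2, h3, h4]

-- ===== VERDICT (by name: the statement is the Claim_ definition above) =====
theorem provider_allowed_by_policy_py_spec : Claim_equal_provider_allowed_by_policy_py := by
  intro provider_id allowlist _
  unfold Spec_provider_allowed_by_policy_py provider_allowed_by_policy_py provider_allowed_by_policy_py_alt
  rw [pv_main (pvNorm provider_id) (allowlist.map pvNorm), List.any_map]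
  simp only [Function.comp_def]
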